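-- pv_equiv track=rewrite | github.com/Gopal-Dahale/quantum-algorithm-grand-challenge-2024 | problem/state_utils.py | process_subsets
-- ===== SOURCE A (Python) =====
-- def custom_filter(func, iterable):
--     return [item for item in iterable if func(item)]
--
-- def unequal_sets(t, n):
--
--     best_qubit = None
--     T_0 = []
--     T_1 = []
--     current_difference = float("-inf")
--
--     for b in range(n):
--         # Filter list based on boolean condition
--         T_0 = custom_filter(lambda x, b=b: x[0][b] == 0, t)
--         T_1 = custom_filter(lambda x, b=b: x[0][b] == 1, t)
--
--         # Check if both sets are non-empty
--         if len(T_0) != 0 and len(T_1) != 0: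
--             difference = abs(len(T_0) - len(T_1))
--             # If new max difference
--             if difference > current_difference:
--                 current_difference = difference
--                 best_qubit = b
--                 t_0 = T_0
--                 t_1 = T_1
--
--     return best_qubit, t_0, t_1
--
-- def process_subsets(t, n, dif_qubits, dif_values):
--     while len(t) > 1:
--         b, T_0, T_1 = unequal_sets(t, n)
--         dif_qubits.append(b)
--         if len(T_0) < len(T_1):
--             t = T_0
--             dif_values.append(0)
--         else:
--             t = T_1
--             dif_values.append(1)
--     return dif_qubits, dif_values, t
-- ===== SOURCE B (Python) =====
-- def process_subsets(t, n, dif_qubits, dif_values):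
--     while len(t) > 1:
--         # one pass over t: per-bit counts of 0s and 1s
--         c0 = [0] * n
--         c1 = [0] * n
--         for x in t:
--             for b, v in enumerate(x[0][:n]):
--                 if v == 0:
--                     c0[b] += 1
--                 elif v == 1:
--                     c1[b] += 1
--         best = None
--         best_diff = -1
--         for b in range(n):
--             if c0[b] > 0 and c1[b] > 0 and abs(c0[b] - c1[b]) > best_diff:
--                 best = b
--                 best_diff = abs(c0[b] - c1[b])
--         dif_qubits.append(best)
--         if c0[best] < c1[best]:
--             t = [x for x in t if x[0][best] == 0]
--             dif_values.append(0)
--         else: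
--             t = [x for x in t if x[0][best] == 1]
--             dif_values.append(1)
--     return dif_qubits, dif_values, t
-- ===== Notes on version B (the rewrite author's own statement) =====
-- stated objective: alternative
-- what changed: Instead of materialising both filtered sublists T_0/T_1 for every qubit on every pass, B makes one counting pass over the states (per-bit 0/1 count arrays), scans the counts for the most-unbalanced separating qubit, and builds a single filtered list only for the chosen qubit.
import Mathlib
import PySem

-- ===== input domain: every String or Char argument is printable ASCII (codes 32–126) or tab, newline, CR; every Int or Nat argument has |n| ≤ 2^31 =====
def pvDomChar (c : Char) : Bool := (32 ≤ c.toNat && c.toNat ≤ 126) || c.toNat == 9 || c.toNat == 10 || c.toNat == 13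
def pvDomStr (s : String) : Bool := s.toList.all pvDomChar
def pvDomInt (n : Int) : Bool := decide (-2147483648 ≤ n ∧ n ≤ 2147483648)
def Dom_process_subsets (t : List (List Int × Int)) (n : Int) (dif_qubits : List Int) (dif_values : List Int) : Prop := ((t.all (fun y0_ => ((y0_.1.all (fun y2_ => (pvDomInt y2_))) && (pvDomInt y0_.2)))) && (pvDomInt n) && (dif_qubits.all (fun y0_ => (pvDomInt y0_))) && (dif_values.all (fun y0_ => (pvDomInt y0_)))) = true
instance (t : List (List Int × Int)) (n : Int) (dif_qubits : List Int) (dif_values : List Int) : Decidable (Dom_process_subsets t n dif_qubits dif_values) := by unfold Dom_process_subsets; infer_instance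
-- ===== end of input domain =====

-- B replaces A's per-bit double filtering with one counting pass over the states, an argmax scan over the
-- counts, and a single filter build for the chosen qubit (objective: alternative decomposition).
-- A mutates dif_qubits/dif_values in place (append); B performs the same mutation; equivalence here is
-- about the return value.

-- ===== PORT A =====
def custom_filter {α : Type} (f : α → Bool) (l : List α) : List α := l.filter f

-- state: (best_qubit, current_difference (none = float("-inf")), t_0, t_1); t_0/t_1 default [] stands
-- for Python's unbound locals, reached only outside Pre_ (there Python raises UnboundLocalError).
def unequal_sets (t : List (List Int × Int)) (n : Int) :
    Option Int × List (List Int × Int) × List (List Int × Int) :=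
  let st := (PySem.List.pyRange 0 n 1).foldl
    (fun (s : Option Int × Option Int × List (List Int × Int) × List (List Int × Int)) b =>
      let T0 := custom_filter (fun x => PySem.List.pyGet? x.1 b == some 0) t
      let T1 := custom_filter (fun x => PySem.List.pyGet? x.1 b == some 1) t
      if T0.length ≠ 0 ∧ T1.length ≠ 0 then
        let difference : Int := |(T0.length : Int) - (T1.length : Int)|
        if (match s.2.1 with | none => true | some d => decide (d < difference)) then
          (some b, some difference, T0, T1)
        else s
      else s)
    (none, none, [], [])
  (st.1, st.2.2.1, st.2.2.2)

-- the while-loop; fuel = len(t) at entry is enough since t strictly shrinks each iteration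
def psLoopA (n : Int) : Nat → List (List Int × Int) → List Int → List Int →
    List Int × List Int × List (List Int × Int)
  | 0, t, dq, dv => (dq, dv, t)
  | fuel+1, t, dq, dv =>
    if 1 < t.length then
      match unequal_sets t n with
      | (b, T0, T1) =>
        -- b.getD 0: inside Pre_ b is always some; Python's append of an int
        if T0.length < T1.length then psLoopA n fuel T0 (dq ++ [b.getD 0]) (dv ++ [0])
        else psLoopA n fuel T1 (dq ++ [b.getD 0]) (dv ++ [1])
    else (dq, dv, t)

def process_subsets (t : List (List Int × Int)) (n : Int) (dif_qubits : List Int) (dif_values : List Int) :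
    List Int × List Int × (List (List Int × Int)) :=
  psLoopA n t.length t dif_qubits dif_values

-- ===== PORT B =====
-- one element's contribution to the per-bit counts: for b, v in enumerate(x[0][:n]) with c0[b] += 1 …
def pvBCountX (n : Int) (c : List Int × List Int) (x : List Int × Int) : List Int × List Int :=
  (PySem.List.enumerate (PySem.List.slice x.1 none (some n)) 0).foldl
    (fun c bv =>
      if bv.2 = 0 then (PySem.List.pySetD c.1 bv.1 (PySem.List.pyGetD c.1 bv.1 0 + 1), c.2)
      else if bv.2 = 1 then (c.1, PySem.List.pySetD c.2 bv.1 (PySem.List.pyGetD c.2 bv.1 0 + 1))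
      else c) c

def pvBCounts (t : List (List Int × Int)) (n : Int) : List Int × List Int :=
  t.foldl (pvBCountX n) (List.replicate n.toNat 0, List.replicate n.toNat 0)

-- best = None; best_diff = -1; argmax scan over the counts
def pvBSelect (c0 c1 : List Int) (n : Int) : Option Int × Int :=
  (PySem.List.pyRange 0 n 1).foldl
    (fun (s : Option Int × Int) b =>
      let a0 := PySem.List.pyGetD c0 b 0
      let a1 := PySem.List.pyGetD c1 b 0
      if 0 < a0 ∧ 0 < a1 ∧ s.2 < |a0 - a1| then (some b, |a0 - a1|) else s)
    (none, -1)

def psLoopB (n : Int) : Nat → List (List Int × Int) → List Int → List Int →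
    List Int × List Int × List (List Int × Int)
  | 0, t, dq, dv => (dq, dv, t)
  | fuel+1, t, dq, dv =>
    if 1 < t.length then
      let c := pvBCounts t n
      match pvBSelect c.1 c.2 n with
      | (some q, _) =>
        if PySem.List.pyGetD c.1 q 0 < PySem.List.pyGetD c.2 q 0 then
          psLoopB n fuel (t.filter (fun x => PySem.List.pyGet? x.1 q == some 0)) (dq ++ [q]) (dv ++ [0])
        else
          psLoopB n fuel (t.filter (fun x => PySem.List.pyGet? x.1 q == some 1)) (dq ++ [q]) (dv ++ [1])
      | (none, _) => (dq, dv, t)   -- here B's Python raises TypeError (c0[None]); outside Pre_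
    else (dq, dv, t)

def process_subsets_alt (t : List (List Int × Int)) (n : Int) (dif_qubits : List Int) (dif_values : List Int) :
    List Int × List Int × (List (List Int × Int)) :=
  psLoopB n t.length t dif_qubits dif_values

-- ===== PRECONDITION & SPEC =====
-- Pre_ excludes the inputs on which A raises: with more than one state, some bitstring shorter than n
-- (IndexError), or no qubit b < n taking both values 0 and 1 on the current states — guaranteed to
-- never happen when all first n entries are 0/1 and the length-n prefixes are pairwise distinct,
-- and guaranteed to eventually happen otherwise when entries are 0/1; A does return on a few excluded
-- inputs with non-0/1 entries (see cites), where B happens to agree as well.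
def Pre_process_subsets (t : List (List Int × Int)) (n : Int) (dif_qubits : List Int) (dif_values : List Int) : Prop :=
  t.length ≤ 1 ∨
    ((∀ x ∈ t, n ≤ (x.1.length : Int) ∧ ∀ v ∈ x.1.take n.toNat, v = 0 ∨ v = 1) ∧
     List.Pairwise (fun x y : List Int × Int => x.1.take n.toNat ≠ y.1.take n.toNat) t)
instance (t : List (List Int × Int)) (n : Int) (dif_qubits : List Int) (dif_values : List Int) : Decidable (Pre_process_subsets t n dif_qubits dif_values) := by unfold Pre_process_subsets; infer_instance

def pvWitness_process_subsets : (List (List Int × Int)) × Int × List Int × List Int :=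
  ([([0, 1], 5), ([1, 0], 7), ([1, 1], 2)], 2, [], [])

def Spec_process_subsets (t : List (List Int × Int)) (n : Int) (dif_qubits : List Int) (dif_values : List Int) (out : List Int × List Int × (List (List Int × Int))) : Prop := out = process_subsets_alt t n dif_qubits dif_values
instance (t : List (List Int × Int)) (n : Int) (dif_qubits : List Int) (dif_values : List Int) (out : List Int × List Int × (List (List Int × Int))) : Decidable (Spec_process_subsets t n dif_qubits dif_values out) := by unfold Spec_process_subsets; infer_instance

-- ===== CLAIM (what is proved, stated in full; the proofs are below) =====
def Claim_equal_process_subsets : Prop := ∀ (t : List (List Int × Int)) (n : Int) (dif_qubits : List Int) (dif_values : List Int), Dom_process_subsets t n dif_qubits dif_values → Pre_process_subsets t n dif_qubits dif_values → Spec_process_subsets t n dif_qubits dif_values (process_subsets t n dif_qubits dif_values)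


-- ===== LEMMAS AND PROOFS =====

-- the filter t by (x[0][b] == v) both programs build, and its length as a Python int
def pvFilt (t : List (List Int × Int)) (b v : Int) : List (List Int × Int) :=
  t.filter (fun x => PySem.List.pyGet? x.1 b == some v)

def pvCnt (t : List (List Int × Int)) (b v : Int) : Int := ((pvFilt t b v).length : Int)

-- named copies of the inline fold bodies of the ports (definitionally equal; see the rfl bridges)
def pvStepA (t : List (List Int × Int))
    (s : Option Int × Option Int × List (List Int × Int) × List (List Int × Int)) (b : Int) :
    Option Int × Option Int × List (List Int × Int) × List (List Int × Int) :=
  let T0 := custom_filter (fun x => PySem.List.pyGet? x.1 b == some 0) t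
  let T1 := custom_filter (fun x => PySem.List.pyGet? x.1 b == some 1) t
  if T0.length ≠ 0 ∧ T1.length ≠ 0 then
    let difference : Int := |(T0.length : Int) - (T1.length : Int)|
    if (match s.2.1 with | none => true | some d => decide (d < difference)) then
      (some b, some difference, T0, T1)
    else s
  else s

def pvStepB (c0 c1 : List Int) (s : Option Int × Int) (b : Int) : Option Int × Int :=
  let a0 := PySem.List.pyGetD c0 b 0
  let a1 := PySem.List.pyGetD c1 b 0
  if 0 < a0 ∧ 0 < a1 ∧ s.2 < |a0 - a1| then (some b, |a0 - a1|) else s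

def pvStepC (c : List Int × List Int) (bv : Int × Int) : List Int × List Int :=
  if bv.2 = 0 then (PySem.List.pySetD c.1 bv.1 (PySem.List.pyGetD c.1 bv.1 0 + 1), c.2)
  else if bv.2 = 1 then (c.1, PySem.List.pySetD c.2 bv.1 (PySem.List.pyGetD c.2 bv.1 0 + 1))
  else c

lemma unequal_sets_def (t : List (List Int × Int)) (n : Int) : unequal_sets t n =
    (let st := (PySem.List.pyRange 0 n 1).foldl (pvStepA t) (none, none, [], []);
     (st.1, st.2.2.1, st.2.2.2)) := rfl

lemma pvBCountX_def (n : Int) (c : List Int × List Int) (x : List Int × Int) :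
    pvBCountX n c x = (PySem.List.enumerate (PySem.List.slice x.1 none (some n)) 0).foldl pvStepC c := rfl

lemma pvBSelect_def (c0 c1 : List Int) (n : Int) :
    pvBSelect c0 c1 n = (PySem.List.pyRange 0 n 1).foldl (pvStepB c0 c1) (none, -1) := rfl

lemma getD_set (l : List Int) (k b : Nat) (a : Int) :
    (l.set k a).getD b 0 = if k = b ∧ k < l.length then a else l.getD b 0 := by
  simp only [List.getD_eq_getElem?_getD, List.getElem?_set]
  split_ifs <;> simp_all <;> omega

lemma stepC_fst_len (c : List Int × List Int) (i y : Int) :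
    (pvStepC c (i, y)).1.length = c.1.length := by
  unfold pvStepC; split_ifs <;> simp [PySem.List.length_pySetD]

lemma stepC_snd_len (c : List Int × List Int) (i y : Int) :
    (pvStepC c (i, y)).2.length = c.2.length := by
  unfold pvStepC; split_ifs <;> simp [PySem.List.length_pySetD]

lemma stepC_fst_getD (c : List Int × List Int) (k b : Nat) (y : Int) (hb : b < c.1.length) :
    (pvStepC c ((k:Int), y)).1.getD b 0 = c.1.getD b 0 + (if b = k ∧ y = 0 then 1 else 0) := by
  by_cases hy0 : y = 0
  · have h2 : pvStepC c ((k:Int), y) = (c.1.set k (c.1.getD k 0 + 1), c.2) := by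
      simp [pvStepC, hy0, PySem.List.pySetD_natCast, PySem.List.pyGetD_natCast]
    rw [h2, getD_set]
    by_cases hbk : b = k
    · subst hbk; simp [hb, hy0]
    · simp only [getD_set] at *
      simp [hbk]
      intro h _
      exact absurd h.symm hbk
  · have h2 : pvStepC c ((k:Int), y) = c ∨ (pvStepC c ((k:Int), y)).1 = c.1 := by
      unfold pvStepC
      by_cases hy1 : y = 1 <;> simp [hy0, hy1]
    rcases h2 with h2 | h2 <;> simp [h2, hy0]

lemma stepC_snd_getD (c : List Int × List Int) (k b : Nat) (y : Int) (hb : b < c.2.length) :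
    (pvStepC c ((k:Int), y)).2.getD b 0 = c.2.getD b 0 + (if b = k ∧ y = 1 then 1 else 0) := by
  by_cases hy1 : y = 1
  · have h2 : pvStepC c ((k:Int), y) = (c.1, c.2.set k (c.2.getD k 0 + 1)) := by
      simp [pvStepC, hy1, PySem.List.pySetD_natCast, PySem.List.pyGetD_natCast]
    rw [h2, getD_set]
    by_cases hbk : b = k
    · subst hbk; simp [hb, hy1]
    · simp only [getD_set] at *
      simp [hbk]
      intro h _
      exact absurd h.symm hbk
  · have h2 : pvStepC c ((k:Int), y) = c ∨ (pvStepC c ((k:Int), y)).2 = c.2 := by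
      unfold pvStepC
      by_cases hy0 : y = 0 <;> simp [hy0, hy1]
    rcases h2 with h2 | h2 <;> simp [h2, hy1]

-- inner counting fold over one state's enumerated bits
lemma L_inner (ys : List Int) : ∀ (k : Nat) (c : List Int × List Int),
    ((PySem.List.enumerate ys (k:Int)).foldl pvStepC c).1.length = c.1.length ∧
    ((PySem.List.enumerate ys (k:Int)).foldl pvStepC c).2.length = c.2.length ∧
    (∀ b : Nat, b < c.1.length →
      ((PySem.List.enumerate ys (k:Int)).foldl pvStepC c).1.getD b 0
        = c.1.getD b 0 + (if k ≤ b ∧ ys[b - k]? = some 0 then 1 else 0)) ∧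
    (∀ b : Nat, b < c.2.length →
      ((PySem.List.enumerate ys (k:Int)).foldl pvStepC c).2.getD b 0
        = c.2.getD b 0 + (if k ≤ b ∧ ys[b - k]? = some 1 then 1 else 0)) := by
  induction ys with
  | nil => intro k c; simp [PySem.List.enumerate]
  | cons y ys ih =>
    intro k c
    have hcast : (k:Int) + 1 = ((k+1 : Nat) : Int) := by push_cast; ring
    rw [PySem.List.enumerate_cons, List.foldl_cons, hcast]
    obtain ⟨ih1, ih2, ih3, ih4⟩ := ih (k+1) (pvStepC c ((k:Int), y))
    refine ⟨by rw [ih1, stepC_fst_len], by rw [ih2, stepC_snd_len], ?_, ?_⟩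
    · intro b hb
      rw [ih3 b (by rw [stepC_fst_len]; exact hb), stepC_fst_getD c k b y hb]
      rcases Nat.lt_trichotomy b k with h | h | h
      · have h1 : ¬ (k ≤ b) := by omega
        have h2 : ¬ (k + 1 ≤ b) := by omega
        simp [h1, h2, show ¬ (b = k) by omega]
      · subst h
        have h2 : ¬ (b + 1 ≤ b) := by omega
        simp [h2, Nat.sub_self]
      · have h1 : k ≤ b := by omega
        have h2 : k + 1 ≤ b := by omega
        have h3 : b - k = (b - (k+1)) + 1 := by omega
        simp [h1, h2, h3, show ¬ (b = k) by omega]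
    · intro b hb
      rw [ih4 b (by rw [stepC_snd_len]; exact hb), stepC_snd_getD c k b y hb]
      rcases Nat.lt_trichotomy b k with h | h | h
      · have h1 : ¬ (k ≤ b) := by omega
        have h2 : ¬ (k + 1 ≤ b) := by omega
        simp [h1, h2, show ¬ (b = k) by omega]
      · subst h
        have h2 : ¬ (b + 1 ≤ b) := by omega
        simp [h2, Nat.sub_self]
      · have h1 : k ≤ b := by omega
        have h2 : k + 1 ≤ b := by omega
        have h3 : b - k = (b - (k+1)) + 1 := by omega
        simp [h1, h2, h3, show ¬ (b = k) by omega]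

-- one state's contribution to the counts
lemma L_countx (n : Int) (x : List Int × Int) (hx : n ≤ (x.1.length : Int))
    (c : List Int × List Int) :
    (pvBCountX n c x).1.length = c.1.length ∧ (pvBCountX n c x).2.length = c.2.length ∧
    ∀ b : Nat, b < n.toNat → b < c.1.length → b < c.2.length →
      (pvBCountX n c x).1.getD b 0 = c.1.getD b 0 + (if x.1[b]? = some 0 then 1 else 0) ∧
      (pvBCountX n c x).2.getD b 0 = c.2.getD b 0 + (if x.1[b]? = some 1 then 1 else 0) := by
  rw [pvBCountX_def, show (0:Int) = ((0:Nat):Int) from rfl]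
  obtain ⟨h1, h2, h3, h4⟩ := L_inner (PySem.List.slice x.1 none (some n)) 0 c
  refine ⟨h1, h2, ?_⟩
  intro b hbn hb1 hb2
  have hn0 : 0 ≤ n := by omega
  have hsl : PySem.List.slice x.1 none (some n) = x.1.take n.toNat :=
    PySem.List.slice_to x.1 hn0
  have hget : (x.1.take n.toNat)[b]? = x.1[b]? := List.getElem?_take_of_lt hbn
  constructor
  · have h := h3 b hb1
    rw [hsl] at h ⊢
    simpa [hget] using h
  · have h := h4 b hb2
    rw [hsl] at h ⊢
    simpa [hget] using h

lemma L_counts_aux (n : Int) : ∀ (t : List (List Int × Int)) (c : List Int × List Int),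
    (∀ x ∈ t, n ≤ (x.1.length : Int)) →
    (t.foldl (pvBCountX n) c).1.length = c.1.length ∧
    (t.foldl (pvBCountX n) c).2.length = c.2.length ∧
    ∀ b : Nat, b < n.toNat → b < c.1.length → b < c.2.length →
      (t.foldl (pvBCountX n) c).1.getD b 0 = c.1.getD b 0 + pvCnt t (b:Int) 0 ∧
      (t.foldl (pvBCountX n) c).2.getD b 0 = c.2.getD b 0 + pvCnt t (b:Int) 1 := by
  intro t
  induction t with
  | nil => intro c H; simp [pvCnt, pvFilt]
  | cons x t ih =>
    intro c H
    rw [List.foldl_cons]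
    obtain ⟨c1, c2, c3⟩ := L_countx n x (H x (by simp)) c
    obtain ⟨i1, i2, i3⟩ := ih (pvBCountX n c x) (fun y hy => H y (by simp [hy]))
    refine ⟨by rw [i1, c1], by rw [i2, c2], ?_⟩
    intro b hbn hb1 hb2
    obtain ⟨e1, e2⟩ := i3 b hbn (by rw [c1]; exact hb1) (by rw [c2]; exact hb2)
    obtain ⟨f1, f2⟩ := c3 b hbn hb1 hb2
    constructor
    · rw [e1, f1]
      have hcnt : pvCnt (x::t) (b:Int) 0 = (if x.1[b]? = some 0 then 1 else 0) + pvCnt t (b:Int) 0 := by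
        simp only [pvCnt, pvFilt, List.filter_cons, PySem.List.pyGet?_natCast]
        split_ifs with h <;> simp_all <;> push_cast <;> ring
      rw [hcnt]; ring
    · rw [e2, f2]
      have hcnt : pvCnt (x::t) (b:Int) 1 = (if x.1[b]? = some 1 then 1 else 0) + pvCnt t (b:Int) 1 := by
        simp only [pvCnt, pvFilt, List.filter_cons, PySem.List.pyGet?_natCast]
        split_ifs with h <;> simp_all <;> push_cast <;> ring
      rw [hcnt]; ring

-- B's counts are the lengths of A's filters
lemma L_counts (t : List (List Int × Int)) (n : Int) (H : ∀ x ∈ t, n ≤ (x.1.length : Int))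
    (q : Int) (h0 : 0 ≤ q) (h1 : q < n) :
    PySem.List.pyGetD (pvBCounts t n).1 q 0 = pvCnt t q 0 ∧
    PySem.List.pyGetD (pvBCounts t n).2 q 0 = pvCnt t q 1 := by
  have hq : ((q.toNat : Nat) : Int) = q := Int.toNat_of_nonneg h0
  have hbn : q.toNat < n.toNat := by omega
  obtain ⟨a1, a2, a3⟩ := L_counts_aux n t (List.replicate n.toNat 0, List.replicate n.toNat 0) H
  obtain ⟨e1, e2⟩ := a3 q.toNat hbn (by simpa using hbn) (by simpa using hbn)
  have h0' : (List.replicate n.toNat (0:Int)).getD q.toNat 0 = 0 := by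
    simp [List.getD_eq_getElem?_getD, List.getElem?_replicate, hbn]
  rw [← hq, PySem.List.pyGetD_natCast, PySem.List.pyGetD_natCast]
  unfold pvBCounts
  rw [e1, e2]
  simp at h0'
  simp [h0', hq]

-- state relation between A's and B's selection folds
def pvRel (t : List (List Int × Int)) (n : Int)
    (sA : Option Int × Option Int × List (List Int × Int) × List (List Int × Int))
    (sB : Option Int × Int) : Prop :=
  sA.1 = sB.1 ∧
  ((sA.1 = none ∧ sA.2.1 = none ∧ sB.2 = -1) ∨
   (∃ q, sA.1 = some q ∧ 0 ≤ q ∧ q < n ∧ sA.2.1 = some sB.2 ∧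
     sA.2.2.1 = pvFilt t q 0 ∧ sA.2.2.2 = pvFilt t q 1 ∧
     (pvFilt t q 0).length ≠ 0 ∧ (pvFilt t q 1).length ≠ 0))

lemma L_rel_step (t : List (List Int × Int)) (n : Int) (H : ∀ x ∈ t, n ≤ (x.1.length : Int))
    (b : Int) (hb0 : 0 ≤ b) (hbn : b < n) (sA : Option Int × Option Int × List (List Int × Int) × List (List Int × Int))
    (sB : Option Int × Int) (h : pvRel t n sA sB) :
    pvRel t n (pvStepA t sA b) (pvStepB (pvBCounts t n).1 (pvBCounts t n).2 sB b) := by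
  obtain ⟨e0, e1⟩ := L_counts t n H b hb0 hbn
  obtain ⟨h1, hcase⟩ := h
  by_cases hne : (pvFilt t b 0).length ≠ 0 ∧ (pvFilt t b 1).length ≠ 0
  · have hnil0 : pvFilt t b 0 ≠ [] := by
      intro hh
      exact hne.1 (by rw [hh]; rfl)
    have hnil1 : pvFilt t b 1 ≠ [] := by
      intro hh
      exact hne.2 (by rw [hh]; rfl)
    have hcf0 : custom_filter (fun x => PySem.List.pyGet? x.1 b == some 0) t = pvFilt t b 0 := rfl
    have hcf1 : custom_filter (fun x => PySem.List.pyGet? x.1 b == some 1) t = pvFilt t b 1 := rfl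
    have hpos0 : 0 < PySem.List.pyGetD (pvBCounts t n).1 b 0 := by
      rw [e0]; unfold pvCnt; exact_mod_cast Nat.pos_of_ne_zero hne.1
    have hpos1 : 0 < PySem.List.pyGetD (pvBCounts t n).2 b 0 := by
      rw [e1]; unfold pvCnt; exact_mod_cast Nat.pos_of_ne_zero hne.2
    have hdeq : |PySem.List.pyGetD (pvBCounts t n).1 b 0 - PySem.List.pyGetD (pvBCounts t n).2 b 0|
        = |((pvFilt t b 0).length : Int) - ((pvFilt t b 1).length : Int)| := by
      rw [e0, e1]; rfl
    rcases hcase with ⟨ha1, ha2, hb2⟩ | ⟨q, hq1, hq2, hq3, hq4, hq5, hq6, hq7⟩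
    · have hgt : sB.2 < |PySem.List.pyGetD (pvBCounts t n).1 b 0 - PySem.List.pyGetD (pvBCounts t n).2 b 0| := by
        rw [hb2]
        have := abs_nonneg (PySem.List.pyGetD (pvBCounts t n).1 b 0 - PySem.List.pyGetD (pvBCounts t n).2 b 0)
        omega
      have hA : pvStepA t sA b
          = (some b, some |((pvFilt t b 0).length : Int) - ((pvFilt t b 1).length : Int)|,
             pvFilt t b 0, pvFilt t b 1) := by
        unfold pvStepA
        rw [ha2]
        simp [hcf0, hcf1, hnil0, hnil1]
      have hB : pvStepB (pvBCounts t n).1 (pvBCounts t n).2 sB b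
          = (some b, |PySem.List.pyGetD (pvBCounts t n).1 b 0 - PySem.List.pyGetD (pvBCounts t n).2 b 0|) := by
        simp only [pvStepB]
        simp [hpos0, hpos1, hgt]
      rw [hA, hB]
      exact ⟨rfl, Or.inr ⟨b, rfl, hb0, hbn, by rw [hdeq], rfl, rfl, hne.1, hne.2⟩⟩
    · by_cases hupd : sB.2 < |((pvFilt t b 0).length : Int) - ((pvFilt t b 1).length : Int)|
      · have hA : pvStepA t sA b
            = (some b, some |((pvFilt t b 0).length : Int) - ((pvFilt t b 1).length : Int)|,
               pvFilt t b 0, pvFilt t b 1) := by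
          unfold pvStepA
          rw [hq4]
          simp [hcf0, hcf1, hnil0, hnil1, hupd]
        have hB : pvStepB (pvBCounts t n).1 (pvBCounts t n).2 sB b
            = (some b, |PySem.List.pyGetD (pvBCounts t n).1 b 0 - PySem.List.pyGetD (pvBCounts t n).2 b 0|) := by
          simp only [pvStepB]
          rw [hdeq]
          simp [hpos0, hpos1, hupd]
        rw [hA, hB]
        exact ⟨rfl, Or.inr ⟨b, rfl, hb0, hbn, by rw [hdeq], rfl, rfl, hne.1, hne.2⟩⟩
      · have hA : pvStepA t sA b = sA := by
          unfold pvStepA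
          rw [hq4]
          simp [hcf0, hcf1, hnil0, hnil1, hupd]
        have hB : pvStepB (pvBCounts t n).1 (pvBCounts t n).2 sB b = sB := by
          simp only [pvStepB]
          rw [hdeq]
          simp [hupd]
        rw [hA, hB]
        exact ⟨h1, Or.inr ⟨q, hq1, hq2, hq3, hq4, hq5, hq6, hq7⟩⟩
  · have hnand : ¬ (custom_filter (fun x => PySem.List.pyGet? x.1 b == some 0) t ≠ [] ∧
        custom_filter (fun x => PySem.List.pyGet? x.1 b == some 1) t ≠ []) := by
      intro hcc
      refine hne ⟨?_, ?_⟩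
      · intro h0
        exact hcc.1 (by rw [show custom_filter (fun x => PySem.List.pyGet? x.1 b == some 0) t = pvFilt t b 0 from rfl]; exact List.length_eq_zero_iff.mp h0)
      · intro h0
        exact hcc.2 (by rw [show custom_filter (fun x => PySem.List.pyGet? x.1 b == some 1) t = pvFilt t b 1 from rfl]; exact List.length_eq_zero_iff.mp h0)
    have hA : pvStepA t sA b = sA := by
      unfold pvStepA
      simp only [ne_eq]
      rw [if_neg (by simpa using hnand)]
    have hB : pvStepB (pvBCounts t n).1 (pvBCounts t n).2 sB b = sB := by
      simp only [pvStepB]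
      have hfalse : ¬ (0 < PySem.List.pyGetD (pvBCounts t n).1 b 0 ∧
          0 < PySem.List.pyGetD (pvBCounts t n).2 b 0 ∧
          sB.2 < |PySem.List.pyGetD (pvBCounts t n).1 b 0 - PySem.List.pyGetD (pvBCounts t n).2 b 0|) := by
        intro hcc
        refine hne ⟨?_, ?_⟩
        · have h' : (0:Int) < ((pvFilt t b 0).length : Int) := by rw [← pvCnt, ← e0]; exact hcc.1
          have : 0 < (pvFilt t b 0).length := by exact_mod_cast h'
          omega
        · have h' : (0:Int) < ((pvFilt t b 1).length : Int) := by rw [← pvCnt, ← e1]; exact hcc.2.1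
          have : 0 < (pvFilt t b 1).length := by exact_mod_cast h'
          omega
      simp [hfalse]
    rw [hA, hB]
    exact ⟨h1, hcase⟩

lemma L_rel_fold (t : List (List Int × Int)) (n : Int) (H : ∀ x ∈ t, n ≤ (x.1.length : Int)) :
    ∀ (l : List Int), (∀ b ∈ l, 0 ≤ b ∧ b < n) → ∀ sA sB, pvRel t n sA sB →
      pvRel t n (l.foldl (pvStepA t) sA)
        (l.foldl (pvStepB (pvBCounts t n).1 (pvBCounts t n).2) sB) := by
  intro l
  induction l with
  | nil => intro _ sA sB h; simpa using h
  | cons b l ih =>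
    intro hb sA sB h
    rw [List.foldl_cons, List.foldl_cons]
    exact ih (fun b' hb' => hb b' (List.mem_cons_of_mem b hb'))
      _ _ (L_rel_step t n H b (hb b (List.mem_cons_self)).1 (hb b (List.mem_cons_self)).2 sA sB h)

lemma L_mono (c0 c1 : List Int) : ∀ (l : List Int) (sB : Option Int × Int), sB.1.isSome →
    (l.foldl (pvStepB c0 c1) sB).1.isSome := by
  intro l
  induction l with
  | nil => intro sB h; simpa using h
  | cons b l ih =>
    intro sB h
    rw [List.foldl_cons]
    apply ih
    simp only [pvStepB]
    split_ifs <;> simp_all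

lemma L_hit (c0 c1 : List Int) : ∀ (l : List Int) (sB : Option Int × Int),
    (sB.1 = none → sB.2 = -1) → ∀ b0 ∈ l,
    0 < PySem.List.pyGetD c0 b0 0 → 0 < PySem.List.pyGetD c1 b0 0 →
    (l.foldl (pvStepB c0 c1) sB).1.isSome := by
  intro l
  induction l with
  | nil => intro sB _ b0 h; simp at h
  | cons b l ih =>
    intro sB hinv b0 hmem hp0 hp1
    rcases List.mem_cons.mp hmem with hhd | htl
    · subst hhd
      cases hs : sB.1 with
      | some q => exact L_mono c0 c1 _ sB (by simp [hs])
      | none =>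
        have hm1 : sB.2 = -1 := hinv hs
        rw [List.foldl_cons]
        apply L_mono
        simp only [pvStepB]
        have hlt : sB.2 < |PySem.List.pyGetD c0 b0 0 - PySem.List.pyGetD c1 b0 0| := by
          have := abs_nonneg (PySem.List.pyGetD c0 b0 0 - PySem.List.pyGetD c1 b0 0)
          omega
        simp [hp0, hp1, hlt]
    · rw [List.foldl_cons]
      apply ih _ _ b0 htl hp0 hp1
      simp only [pvStepB]
      split_ifs <;> simp_all

-- under Pre_ with at least two states, some qubit separates them
lemma L_exists_b0 (t : List (List Int × Int)) (n : Int)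
    (H : ∀ x ∈ t, n ≤ (x.1.length : Int) ∧ ∀ v ∈ x.1.take n.toNat, v = 0 ∨ v = 1)
    (hPW : List.Pairwise (fun x y : List Int × Int => x.1.take n.toNat ≠ y.1.take n.toNat) t)
    (hlen : 1 < t.length) :
    ∃ b0 : Int, 0 ≤ b0 ∧ b0 < n ∧ 0 < pvCnt t b0 0 ∧ 0 < pvCnt t b0 1 := by
  obtain ⟨x, y, r, rfl⟩ : ∃ x y r, t = x :: y :: r := by
    cases t with
    | nil => simp at hlen
    | cons x t' =>
      cases t' with
      | nil => simp at hlen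
      | cons y r => exact ⟨x, y, r, rfl⟩
  have Hx := H x (by simp)
  have Hy := H y (by simp)
  have hxy : x.1.take n.toNat ≠ y.1.take n.toNat := (List.pairwise_cons.mp hPW).1 y (by simp)
  obtain ⟨j, hj⟩ : ∃ j : Nat, (x.1.take n.toNat)[j]? ≠ (y.1.take n.toNat)[j]? := by
    by_contra hc
    push Not at hc
    exact hxy (List.ext_getElem? hc)
  have hkx : n.toNat ≤ x.1.length := by have := Hx.1; omega
  have hky : n.toNat ≤ y.1.length := by have := Hy.1; omega
  have hjk : j < n.toNat := by
    by_contra hge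
    apply hj
    rw [List.getElem?_eq_none, List.getElem?_eq_none] <;> simp [List.length_take] <;> omega
  have hjx : j < x.1.length := lt_of_lt_of_le hjk hkx
  have hjy : j < y.1.length := lt_of_lt_of_le hjk hky
  have ex : (x.1.take n.toNat)[j]? = some x.1[j] := by
    rw [List.getElem?_take_of_lt hjk]; exact List.getElem?_eq_getElem hjx
  have ey : (y.1.take n.toNat)[j]? = some y.1[j] := by
    rw [List.getElem?_take_of_lt hjk]; exact List.getElem?_eq_getElem hjy
  have hvx : x.1[j] = 0 ∨ x.1[j] = 1 := Hx.2 _ (List.mem_of_getElem? ex)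
  have hvy : y.1[j] = 0 ∨ y.1[j] = 1 := Hy.2 _ (List.mem_of_getElem? ey)
  have hnev : x.1[j] ≠ y.1[j] := by
    intro hh
    apply hj
    rw [ex, ey, hh]
  have key : ∀ v : Int, (x.1[j] = v ∨ y.1[j] = v) → 0 < pvCnt (x::y::r) (j:Int) v := by
    intro v hv
    have hz : ∃ z, z ∈ pvFilt (x::y::r) (j:Int) v := by
      rcases hv with hv | hv
      · exact ⟨x, List.mem_filter.mpr ⟨by simp,
          by simp [PySem.List.pyGet?_natCast, List.getElem?_eq_getElem hjx, hv]⟩⟩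
      · exact ⟨y, List.mem_filter.mpr ⟨by simp,
          by simp [PySem.List.pyGet?_natCast, List.getElem?_eq_getElem hjy, hv]⟩⟩
    obtain ⟨z, hzmem⟩ := hz
    have hpos : 0 < (pvFilt (x::y::r) (j:Int) v).length := List.length_pos_of_mem hzmem
    unfold pvCnt
    exact_mod_cast hpos
  refine ⟨(j:Int), by omega, by omega, ?_, ?_⟩
  · refine key 0 ?_
    rcases hvx with h | h
    · exact Or.inl h
    · rcases hvy with h' | h'
      · exact Or.inr h'
      · exact absurd (h.trans h'.symm) hnev
  · refine key 1 ?_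
    rcases hvx with h | h
    · rcases hvy with h' | h'
      · exact absurd (h.trans h'.symm) hnev
      · exact Or.inr h'
    · exact Or.inl h

-- one iteration: A's unequal_sets and B's count-argmax pick the same qubit and sublists
lemma L_iter (t : List (List Int × Int)) (n : Int)
    (H : ∀ x ∈ t, n ≤ (x.1.length : Int) ∧ ∀ v ∈ x.1.take n.toNat, v = 0 ∨ v = 1)
    (hPW : List.Pairwise (fun x y : List Int × Int => x.1.take n.toNat ≠ y.1.take n.toNat) t)
    (hlen : 1 < t.length) :
    ∃ q : Int, 0 ≤ q ∧ q < n ∧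
      unequal_sets t n = (some q, pvFilt t q 0, pvFilt t q 1) ∧
      (pvBSelect (pvBCounts t n).1 (pvBCounts t n).2 n).1 = some q ∧
      PySem.List.pyGetD (pvBCounts t n).1 q 0 = pvCnt t q 0 ∧
      PySem.List.pyGetD (pvBCounts t n).2 q 0 = pvCnt t q 1 := by
  have H1 : ∀ x ∈ t, n ≤ (x.1.length : Int) := fun x hx => (H x hx).1
  obtain ⟨b0, hb00, hb0n, hc0, hc1⟩ := L_exists_b0 t n H hPW hlen
  obtain ⟨g0, g1⟩ := L_counts t n H1 b0 hb00 hb0n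
  have hsome : (pvBSelect (pvBCounts t n).1 (pvBCounts t n).2 n).1.isSome := by
    rw [pvBSelect_def]
    exact L_hit _ _ _ _ (fun _ => rfl) b0 (PySem.List.mem_pyRange_one.mpr ⟨hb00, hb0n⟩)
      (by rw [g0]; exact hc0) (by rw [g1]; exact hc1)
  obtain ⟨q, hq⟩ := Option.isSome_iff_exists.mp hsome
  have hrel := L_rel_fold t n H1 (PySem.List.pyRange 0 n 1)
      (fun b hb => PySem.List.mem_pyRange_one.mp hb) (none, none, [], []) (none, -1)
      ⟨rfl, Or.inl ⟨rfl, rfl, rfl⟩⟩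
  obtain ⟨r1, rcase⟩ := hrel
  have hsB : ((PySem.List.pyRange 0 n 1).foldl
      (pvStepB (pvBCounts t n).1 (pvBCounts t n).2) (none, -1)).1 = some q := by
    rw [← pvBSelect_def]; exact hq
  rcases rcase with ⟨ha1, _, _⟩ | ⟨q', hq1, hq2, hq3, _, hq5, hq6, _, _⟩
  · rw [ha1, hsB] at r1; exact absurd r1 (by simp)
  · have hqq : q' = q := by
      rw [hq1, hsB] at r1
      exact Option.some.inj r1
    subst hqq
    refine ⟨q', hq2, hq3, ?_, hq, (L_counts t n H1 q' hq2 hq3).1, (L_counts t n H1 q' hq2 hq3).2⟩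
    rw [unequal_sets_def]
    simp only []
    rw [hq5, hq6, ← hq1, r1, hsB]

-- the loops agree step by step
lemma L_loop (n : Int) : ∀ (fuel : Nat) (t : List (List Int × Int)) (dq dv : List Int),
    (t.length ≤ 1 ∨
      ((∀ x ∈ t, n ≤ (x.1.length : Int) ∧ ∀ v ∈ x.1.take n.toNat, v = 0 ∨ v = 1) ∧
       List.Pairwise (fun x y : List Int × Int => x.1.take n.toNat ≠ y.1.take n.toNat) t)) →
    psLoopA n fuel t dq dv = psLoopB n fuel t dq dv := by
  intro fuel
  induction fuel with
  | zero => intro t dq dv _; rfl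
  | succ fuel ih =>
    intro t dq dv hpre
    by_cases hlen : 1 < t.length
    · rcases hpre with hle | ⟨H, hPW⟩
      · omega
      obtain ⟨q, hq0, hqn, hU, hS, hg0, hg1⟩ := L_iter t n H hPW hlen
      have hSel : pvBSelect (pvBCounts t n).1 (pvBCounts t n).2 n
          = (some q, (pvBSelect (pvBCounts t n).1 (pvBCounts t n).2 n).2) := by
        exact Prod.ext_iff.mpr ⟨hS, rfl⟩
      have hpre0 : ∀ v : Int, (pvFilt t q v).length ≤ 1 ∨
          ((∀ x ∈ pvFilt t q v, n ≤ (x.1.length : Int) ∧ ∀ w ∈ x.1.take n.toNat, w = 0 ∨ w = 1) ∧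
           List.Pairwise (fun x y : List Int × Int => x.1.take n.toNat ≠ y.1.take n.toNat) (pvFilt t q v)) :=
        fun v => Or.inr ⟨fun x hx => H x (List.mem_of_mem_filter hx),
          List.Pairwise.sublist List.filter_sublist hPW⟩
      have hcond : ((pvFilt t q 0).length < (pvFilt t q 1).length) ↔
          (PySem.List.pyGetD (pvBCounts t n).1 q 0 < PySem.List.pyGetD (pvBCounts t n).2 q 0) := by
        rw [hg0, hg1]
        unfold pvCnt
        exact (Nat.cast_lt (α := Int)).symm
      have eA : psLoopA n (fuel+1) t dq dv =
          if (pvFilt t q 0).length < (pvFilt t q 1).length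
          then psLoopA n fuel (pvFilt t q 0) (dq ++ [q]) (dv ++ [0])
          else psLoopA n fuel (pvFilt t q 1) (dq ++ [q]) (dv ++ [1]) := by
        simp only [psLoopA]
        rw [if_pos hlen, hU]
        rfl
      have eB : psLoopB n (fuel+1) t dq dv =
          if PySem.List.pyGetD (pvBCounts t n).1 q 0 < PySem.List.pyGetD (pvBCounts t n).2 q 0
          then psLoopB n fuel (pvFilt t q 0) (dq ++ [q]) (dv ++ [0])
          else psLoopB n fuel (pvFilt t q 1) (dq ++ [q]) (dv ++ [1]) := by
        simp only [psLoopB]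
        rw [if_pos hlen, hSel]
        rfl
      rw [eA, eB]
      by_cases hc : (pvFilt t q 0).length < (pvFilt t q 1).length
      · rw [if_pos hc, if_pos (hcond.mp hc)]
        exact ih (pvFilt t q 0) (dq ++ [q]) (dv ++ [0]) (hpre0 0)
      · rw [if_neg hc, if_neg (fun hh => hc (hcond.mpr hh))]
        exact ih (pvFilt t q 1) (dq ++ [q]) (dv ++ [1]) (hpre0 1)
    · simp only [psLoopA, psLoopB, if_neg hlen]

-- ===== VERDICT (by name: the statement is the Claim_ definition above) =====
theorem process_subsets_spec : Claim_equal_process_subsets := by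
  intro t n dq dv _ hpre
  unfold Spec_process_subsets process_subsets process_subsets_alt
  exact L_loop n t.length t dq dv hpre
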